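-- pv_equiv track=rewrite | github.com/mihaelacsn/CS_Labs | Lab2/main.py | FillerLetter
-- ===== SOURCE A (Python) =====
-- def FillerLetter(text):
--     k = len(text)
--     new_word = text
--
--     if k % 2 == 0:
--         for i in range(0, k, 2):
--             if text[i] == text[i + 1]:
--                 new_word = text[0:i + 1] + str('x') + text[i + 1:]
--                 new_word = FillerLetter(new_word)
--                 break
--     else:
--         for i in range(0, k - 1, 2):
--             if text[i] == text[i + 1]:
--                 new_word = text[0:i + 1] + str('x') + text[i + 1:]
--                 new_word = FillerLetter(new_word)
--                 break
--
--     return new_word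
-- ===== SOURCE B (Python) =====
-- def FillerLetter(text):
--     # Single left-to-right pass: on an equal pair emit the first char plus the
--     # filler 'x' and re-pair starting at the second char; no recursion, no slicing.
--     out = []
--     i = 0
--     n = len(text)
--     while i + 1 < n:
--         if text[i] == text[i + 1]:
--             out.append(text[i])
--             out.append('x')
--             i += 1
--         else:
--             out.append(text[i])
--             out.append(text[i + 1])
--             i += 2
--     if i < n:
--         out.append(text[i])
--     return ''.join(out)
-- ===== Notes on version B (the rewrite author's own statement) =====
-- stated objective: faster
-- what changed: B replaces A's restart-from-scratch recursion (rescan all even pairs and rebuild the string by slicing after every insertion) with a single left-to-right pass that, on an equal pair, emits the first char plus the filler 'x' and re-pairs from the second char.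
-- outside the precondition, e.g. on FillerLetter('axx'): A returns 'axx', B returns 'axx'
import Mathlib
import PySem

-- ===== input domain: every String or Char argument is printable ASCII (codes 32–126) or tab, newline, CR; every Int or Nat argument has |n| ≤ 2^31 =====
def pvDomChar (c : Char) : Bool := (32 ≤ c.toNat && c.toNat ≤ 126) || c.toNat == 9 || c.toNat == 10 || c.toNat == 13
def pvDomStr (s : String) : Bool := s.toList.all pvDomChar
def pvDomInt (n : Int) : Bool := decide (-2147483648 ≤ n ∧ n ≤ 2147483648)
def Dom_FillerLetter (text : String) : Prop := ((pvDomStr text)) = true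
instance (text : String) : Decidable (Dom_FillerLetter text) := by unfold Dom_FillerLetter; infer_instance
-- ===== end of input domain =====

-- B replaces A's restart-from-scratch recursion with one left-to-right pass that
-- re-pairs from the second char of an equal pair (measured faster, asymptotic).


-- ===== PORT A =====
-- A's for-loop with break: first even i with text[i] = text[i+1] (i+1 < k).
def pvFindA : List Char → Option Nat
  | a :: b :: r => if a = b then some 0 else (pvFindA r).map (· + 2)
  | _ => none

-- A's recursion, with fuel (length+1 suffices on Pre_; A recurses forever outside it).
-- Python: if k % 2 == 0 the loop runs over range(0,k,2), else over range(0,k-1,2);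
-- both visit exactly the even i with i+1 < k, which is pvFindA's scan.
def pvAgo : Nat → List Char → List Char
  | 0, l => l
  | f + 1, l =>
    match (if l.length % 2 = 0 then pvFindA l else pvFindA l) with
    | none => l
    | some i => pvAgo f (l.take (i + 1) ++ 'x' :: l.drop (i + 1))   -- text[0:i+1] + 'x' + text[i+1:]

def FillerLetter (text : String) : String :=
  String.ofList (pvAgo (text.toList.length + 1) text.toList)

-- ===== PORT B =====
-- Source B's single pass: equal pair → emit first char and 'x', re-pair from the second;
-- unequal pair → emit both; lone trailing char is copied.
def pvAlt : List Char → List Char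
  | [] => []
  | [c] => [c]
  | a :: b :: r => if a = b then a :: 'x' :: pvAlt (b :: r) else a :: b :: pvAlt r

def FillerLetter_alt (text : String) : String := String.ofList (pvAlt text.toList)

-- ===== PRECONDITION & SPEC =====
-- Pre_ excludes strings containing two adjacent 'x' characters: on some of them
-- (e.g. "xx") A recurses forever (RecursionError); on those with "xx" where A does
-- return (e.g. "axx", where both programs return "axx") the exclusion is broader
-- than needed, but A can only diverge when the input contains adjacent 'x's.
def pvNoXX : List Char → Bool
  | [] => true
  | [_] => true
  | a :: b :: r => !(a = 'x' && b = 'x') && pvNoXX (b :: r)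

def Pre_FillerLetter (text : String) : Prop := pvNoXX text.toList = true
instance (text : String) : Decidable (Pre_FillerLetter text) := by
  unfold Pre_FillerLetter; infer_instance

def pvWitness_FillerLetter : String := "hello"

def Spec_FillerLetter (text : String) (out : String) : Prop := out = FillerLetter_alt text
instance (text : String) (out : String) : Decidable (Spec_FillerLetter text out) := by
  unfold Spec_FillerLetter; infer_instance

-- ===== CLAIM (what is proved, stated in full; the proofs are below) =====
def Claim_equal_FillerLetter : Prop :=
  ∀ (text : String), Dom_FillerLetter text → Pre_FillerLetter text →
    Spec_FillerLetter text (FillerLetter text)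

-- ===== LEMMAS AND PROOFS =====

-- pairs at even offsets are all unequal
def pvPairsNe : List Char → Prop
  | a :: b :: r => a ≠ b ∧ pvPairsNe r
  | _ => True

theorem pvAlt_of_find_none : ∀ l : List Char, pvFindA l = none → pvAlt l = l := by
  intro l
  fun_induction pvAlt l with
  | case1 => intro; rfl
  | case2 c => intro; rfl
  | case3 x y ih => intro h; simp [pvFindA] at h
  | case4 a b r hab ih =>
      intro h
      simp only [pvFindA, if_neg hab, Option.map_eq_none_iff] at h
      simp [ih h]

theorem pvFindA_append : ∀ p s : List Char, p.length % 2 = 0 → pvPairsNe p →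
    pvFindA (p ++ s) = (pvFindA s).map (· + p.length) := by
  intro p
  induction p using pvPairsNe.induct with
  | case1 a b r ih =>
      intro s hlen hne
      obtain ⟨hab, hne⟩ := hne
      simp only [List.cons_append, pvFindA, if_neg hab,
        ih s (by simp at hlen ⊢; omega) hne]
      cases pvFindA s with
      | none => rfl
      | some j => simp; omega
  | case2 p h =>
      intro s hlen _
      cases p with
      | nil => simp
      | cons a t =>
        cases t with
        | nil => simp at hlen
        | cons b r => exact (h a b r rfl).elim

theorem pvPairsNe_append : ∀ p q : List Char, p.length % 2 = 0 → pvPairsNe p →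
    pvPairsNe q → pvPairsNe (p ++ q) := by
  intro p
  induction p using pvPairsNe.induct with
  | case1 a b r ih =>
      intro q hlen ⟨hab, hne⟩ hq
      exact ⟨hab, ih q (by simp at hlen ⊢; omega) hne hq⟩
  | case2 p h =>
      intro q hlen _ hq
      cases p with
      | nil => exact hq
      | cons a t =>
        cases t with
        | nil => simp at hlen
        | cons b r => exact (h a b r rfl).elim

theorem pvAgo_append : ∀ (f : Nat) (p s : List Char), p.length % 2 = 0 → pvPairsNe p →
    pvAgo f (p ++ s) = p ++ pvAgo f s := by
  intro f
  induction f with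
  | zero => intro p s _ _; rfl
  | succ f ih =>
      intro p s hlen hne
      simp only [pvAgo, ite_self, pvFindA_append p s hlen hne]
      cases hfs : pvFindA s with
      | none => rfl
      | some j =>
          simp only [Option.map_some]
          have h1 : (p ++ s).take (j + p.length + 1) = p ++ s.take (j + 1) := by
            rw [show j + p.length + 1 = p.length + (j + 1) by omega, List.take_append]
            simp
          have h2 : (p ++ s).drop (j + p.length + 1) = s.drop (j + 1) := by
            rw [show j + p.length + 1 = p.length + (j + 1) by omega, List.drop_append]
            simp
          rw [h1, h2, List.append_assoc, ih p _ hlen hne]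

theorem pvAlt_append : ∀ p s : List Char, p.length % 2 = 0 → pvPairsNe p →
    pvAlt (p ++ s) = p ++ pvAlt s := by
  intro p
  induction p using pvPairsNe.induct with
  | case1 a b r ih =>
      intro s hlen ⟨hab, hne⟩
      cases r with
      | nil =>
          cases s with
          | nil => simp [pvAlt, if_neg hab]
          | cons c t => simp [pvAlt, if_neg hab]
      | cons c t =>
          simp only [List.cons_append, pvAlt, if_neg hab]
          rw [← List.cons_append, ih s (by simp at hlen ⊢; omega) hne]
          simp
  | case2 p h =>
      intro s hlen _
      cases p with
      | nil => rfl
      | cons a t =>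
        cases t with
        | nil => simp at hlen
        | cons b r => exact (h a b r rfl).elim

theorem pvFindA_some : ∀ (l : List Char) (i : Nat), pvFindA l = some i →
    ∃ p c s, l = p ++ c :: c :: s ∧ p.length = i ∧ p.length % 2 = 0 ∧ pvPairsNe p := by
  intro l
  induction l using pvPairsNe.induct with
  | case1 a b r ih =>
      intro i hi
      by_cases hab : a = b
      · subst hab
        simp [pvFindA] at hi
        exact ⟨[], a, r, by simp, by simp; omega, by simp, trivial⟩
      · simp only [pvFindA, if_neg hab, Option.map_eq_some_iff] at hi
        obtain ⟨j, hj, hij⟩ := hi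
        obtain ⟨p, c, s, hl, hp, hp2, hne⟩ := ih j hj
        exact ⟨a :: b :: p, c, s, by simp [hl], by simp [hp]; omega,
          by simp [Nat.add_mod, hp2], ⟨hab, hne⟩⟩
  | case2 p h =>
      intro i hi
      cases p with
      | nil => simp [pvFindA] at hi
      | cons a t =>
        cases t with
        | nil => simp [pvFindA] at hi
        | cons b r => exact (h a b r rfl).elim

theorem pvNoXX_cons : ∀ (a : Char) (l : List Char), pvNoXX (a :: l) = true → pvNoXX l = true := by
  intro a l h
  cases l with
  | nil => rfl
  | cons b r => simp only [pvNoXX, Bool.and_eq_true] at h; exact h.2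

theorem pvNoXX_suffix : ∀ p q : List Char, pvNoXX (p ++ q) = true → pvNoXX q = true := by
  intro p
  induction p with
  | nil => exact fun q h => h
  | cons a t ih => intro q h; exact ih q (pvNoXX_cons a (t ++ q) h)

theorem pvMain : ∀ (f : Nat) (l : List Char), pvNoXX l = true → l.length ≤ f →
    pvAgo f l = pvAlt l := by
  intro f
  induction f with
  | zero =>
      intro l _ hlen
      have : l = [] := by cases l with | nil => rfl | cons a t => simp at hlen
      subst this; rfl
  | succ f ih =>
      intro l hno hlen
      simp only [pvAgo, ite_self]
      cases hf : pvFindA l with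
      | none => exact (pvAlt_of_find_none l hf).symm
      | some i =>
          obtain ⟨p, c, s, hl, hpi, hp2, hne⟩ := pvFindA_some l i hf
          subst hl
          have hcs : pvNoXX (c :: c :: s) = true := pvNoXX_suffix p _ hno
          have hcx : c ≠ 'x' := by
            intro hc; subst hc
            simp [pvNoXX] at hcs
          have htake : (p ++ c :: c :: s).take (i + 1) = p ++ [c] := by
            rw [← hpi, List.take_append]
            simp
          have hdrop : (p ++ c :: c :: s).drop (i + 1) = c :: s := by
            rw [← hpi, List.drop_append]
            simp
          change pvAgo f ((p ++ c :: c :: s).take (i + 1) ++ 'x' :: (p ++ c :: c :: s).drop (i + 1)) = pvAlt (p ++ c :: c :: s)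
          rw [htake, hdrop]
          have hq2 : (p ++ [c, 'x']).length % 2 = 0 := by
            simp [hp2]
          have hqne : pvPairsNe (p ++ [c, 'x']) :=
            pvPairsNe_append p [c, 'x'] hp2 hne ⟨hcx, trivial⟩
          have harr : (p ++ [c]) ++ 'x' :: c :: s = (p ++ [c, 'x']) ++ c :: s := by simp
          rw [harr, pvAgo_append f (p ++ [c, 'x']) (c :: s) hq2 hqne,
            ih (c :: s) (pvNoXX_cons c _ hcs) (by simp at hlen ⊢; omega),
            pvAlt_append p (c :: c :: s) hp2 hne]
          simp [pvAlt]

-- ===== VERDICT (by name: the statement is the Claim_ definition above) =====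
theorem FillerLetter_spec : Claim_equal_FillerLetter := by
  intro text _ hpre
  unfold Spec_FillerLetter FillerLetter FillerLetter_alt
  rw [pvMain (text.toList.length + 1) text.toList hpre (by omega)]
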